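-- pv_equiv track=rewrite | github.com/openstack/cinder | cinder/volume/drivers/nec/volume_common.py | convert_to_id
-- ===== SOURCE A (Python) =====
-- def convert_to_id(value62):
--     alnum = "0123456789ABCDEFGHIJKLMNOPQRSTUVWXYZabcdefghijklmnopqrstuvwxyz"
--     length = len(value62)
--
--     weight = 0
--     value = 0
--     index = 0
--     for i in reversed(range(0, length)):
--         num = alnum.find(value62[i])
--         if index != 0:
--             value += int(weight * (num))
--         else:
--             value = num
--         index += 1
--         weight = 62 ** index
--
--     value = '%032x' % value
--
--     uuid = value[0:8]
--     uuid += '-'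
--     uuid += value[8:12]
--     uuid += '-'
--     uuid += value[12:16]
--     uuid += '-'
--     uuid += value[16:20]
--     uuid += '-'
--     uuid += value[20:]
--
--     return uuid
-- ===== SOURCE B (Python) =====
-- def convert_to_id(value62):
--     alnum = "0123456789ABCDEFGHIJKLMNOPQRSTUVWXYZabcdefghijklmnopqrstuvwxyz"
--     value = 0
--     for c in value62:
--         value = value * 62 + alnum.find(c)
--     value = '%032x' % value
--     return '-'.join([value[0:8], value[8:12], value[12:16],
--                      value[16:20], value[20:]])
-- ===== Notes on version B (the rewrite author's own statement) =====
-- stated objective: faster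
-- what changed: Replaces the reversed-index loop that recomputes the big-integer power weight = 62**index on every iteration by a forward Horner fold (value = value*62 + alnum.find(c)), and assembles the dashed UUID with a single join instead of repeated concatenation.
import Mathlib
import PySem

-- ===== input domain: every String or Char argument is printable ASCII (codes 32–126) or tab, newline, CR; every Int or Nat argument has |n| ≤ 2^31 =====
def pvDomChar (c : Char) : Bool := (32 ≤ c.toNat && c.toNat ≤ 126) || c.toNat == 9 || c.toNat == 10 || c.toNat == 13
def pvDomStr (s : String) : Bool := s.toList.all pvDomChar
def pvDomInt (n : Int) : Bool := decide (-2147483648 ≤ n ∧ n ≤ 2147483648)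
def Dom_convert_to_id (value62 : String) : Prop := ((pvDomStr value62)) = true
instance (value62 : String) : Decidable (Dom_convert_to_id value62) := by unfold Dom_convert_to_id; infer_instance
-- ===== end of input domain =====

-- B replaces A's reversed loop with an explicit 62**index weight by a forward Horner fold,
-- and joins the five UUID slices with one join instead of repeated concatenation (objective: faster, measured).

-- shared helper: Python's '%032x' % v, exact for every Int (sign counts towards the width, hex lowercase)
def pvHex32 (v : Int) : List Char :=
  if v < 0 then
    '-' :: (List.replicate (31 - (Nat.toDigits 16 (-v).toNat).length) '0' ++ Nat.toDigits 16 (-v).toNat)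
  else
    List.replicate (32 - (Nat.toDigits 16 v.toNat).length) '0' ++ Nat.toDigits 16 v.toNat

def pvAlnum : List Char := "0123456789ABCDEFGHIJKLMNOPQRSTUVWXYZabcdefghijklmnopqrstuvwxyz".toList

-- ===== PORT A =====
def convert_to_id (value62 : String) : String :=
  let cs := value62.toList
  let length : Int := (cs.length : Int)
  let st := ((PySem.List.pyRange 0 length 1).reverse).foldl
    (fun (s : Int × Int × Nat) i =>
      let num : Int := PySem.Chars.find pvAlnum [(PySem.List.pyGet? cs i).getD ' ']
      let value := if s.2.2 ≠ 0 then s.2.1 + s.1 * num else num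
      let index := s.2.2 + 1
      ((62 : Int) ^ index, value, index))
    (0, 0, 0)
  let value := pvHex32 st.2.1
  let uuid := PySem.List.slice value (some 0) (some 8)
  let uuid := uuid ++ ['-']
  let uuid := uuid ++ PySem.List.slice value (some 8) (some 12)
  let uuid := uuid ++ ['-']
  let uuid := uuid ++ PySem.List.slice value (some 12) (some 16)
  let uuid := uuid ++ ['-']
  let uuid := uuid ++ PySem.List.slice value (some 16) (some 20)
  let uuid := uuid ++ ['-']
  let uuid := uuid ++ PySem.List.slice value (some 20) none
  String.mk uuid

-- ===== PORT B =====
def convert_to_id_alt (value62 : String) : String :=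
  let value := value62.toList.foldl
    (fun (acc : Int) c => acc * 62 + PySem.Chars.find pvAlnum [c]) 0
  let v := pvHex32 value
  String.mk (PySem.Chars.join ['-']
    [PySem.List.slice v (some 0) (some 8),
     PySem.List.slice v (some 8) (some 12),
     PySem.List.slice v (some 12) (some 16),
     PySem.List.slice v (some 16) (some 20),
     PySem.List.slice v (some 20) none])

-- ===== PRECONDITION & SPEC =====
def Spec_convert_to_id (value62 : String) (out : String) : Prop := out = convert_to_id_alt value62
instance (value62 : String) (out : String) : Decidable (Spec_convert_to_id value62 out) := by unfold Spec_convert_to_id; infer_instance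

-- ===== CLAIM (what is proved, stated in full; the proofs are below) =====
def Claim_equal_convert_to_id : Prop := ∀ (value62 : String), Dom_convert_to_id value62 → Spec_convert_to_id value62 (convert_to_id value62)

-- ===== LEMMAS AND PROOFS =====

-- the value of the base-62 polynomial read least-significant digit first
def pvPolyr : List Int → Int
  | [] => 0
  | n :: t => n + 62 * pvPolyr t

-- A's loop body on the digit value
def pvStep (s : Int × Int × Nat) (num : Int) : Int × Int × Nat :=
  let value := if s.2.2 ≠ 0 then s.2.1 + s.1 * num else num
  let index := s.2.2 + 1
  ((62 : Int) ^ index, value, index)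

lemma pvStep_run (t : List Int) : ∀ (v : Int) (k : Nat),
    t.foldl pvStep ((62 : Int) ^ (k + 1), v, k + 1)
      = ((62 : Int) ^ (k + 1 + t.length), v + (62 : Int) ^ (k + 1) * pvPolyr t, k + 1 + t.length) := by
  induction t with
  | nil => intro v k; simp [pvPolyr]
  | cons n t ih =>
    intro v k
    have h1 : pvStep ((62 : Int) ^ (k + 1), v, k + 1) n
        = ((62 : Int) ^ (k + 2), v + (62 : Int) ^ (k + 1) * n, k + 2) := by
      simp [pvStep]
    simp only [List.foldl_cons, h1]
    rw [show k + 2 = (k + 1) + 1 from rfl, ih]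
    simp only [Prod.mk.injEq, List.length_cons, pvPolyr]
    refine ⟨by rw [show k + 1 + 1 + t.length = k + 1 + (t.length + 1) by omega], by ring, by omega⟩

lemma pvStep_run_value (r : List Int) :
    (r.foldl pvStep ((0 : Int), (0 : Int), (0 : Nat))).2.1 = pvPolyr r := by
  cases r with
  | nil => simp [pvPolyr]
  | cons n t =>
    have h0 : pvStep ((0 : Int), (0 : Int), (0 : Nat)) n = ((62 : Int) ^ (0 + 1), n, 0 + 1) := by
      simp [pvStep]
    simp only [List.foldl_cons, h0, pvStep_run]
    simp [pvPolyr]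

lemma pvPolyr_append (r : List Int) (n : Int) :
    pvPolyr (r ++ [n]) = pvPolyr r + (62 : Int) ^ r.length * n := by
  induction r with
  | nil => simp [pvPolyr]
  | cons m t ih => simp [pvPolyr, ih]; ring

lemma pvHorner (l : List Int) : ∀ (a : Int),
    l.foldl (fun acc n => acc * 62 + n) a = a * (62 : Int) ^ l.length + pvPolyr l.reverse := by
  induction l with
  | nil => intro a; simp [pvPolyr]
  | cons n t ih =>
    intro a
    simp only [List.foldl_cons, ih, List.reverse_cons, pvPolyr_append, List.length_reverse,
      List.length_cons]
    ring

lemma pvMapRangeGetD (cs : List Char) :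
    (List.range cs.length).map (fun k => cs.getD k ' ') = cs := by
  apply List.ext_getElem
  · simp
  · intro i h1 h2
    simp at h1
    simp [List.getD_eq_getElem?_getD, h1]

-- both loops compute pvPolyr of the reversed digit list
lemma pvValues_eq (cs : List Char) :
    (((PySem.List.pyRange 0 (cs.length : Int) 1).reverse).foldl
      (fun (s : Int × Int × Nat) i =>
        let num : Int := PySem.Chars.find pvAlnum [(PySem.List.pyGet? cs i).getD ' ']
        let value := if s.2.2 ≠ 0 then s.2.1 + s.1 * num else num
        let index := s.2.2 + 1
        ((62 : Int) ^ index, value, index))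
      (0, 0, 0)).2.1
    = cs.foldl (fun (acc : Int) c => acc * 62 + PySem.Chars.find pvAlnum [c]) 0 := by
  have hrange : PySem.List.pyRange 0 (cs.length : Int) 1
      = (List.range cs.length).map (fun k => Int.ofNat k) := by
    have h0 : (((cs.length : Int)) - 0).toNat = cs.length := by simp
    rw [PySem.List.pyRange_one, h0]
    exact List.map_congr_left (fun k _ => by simp)
  -- rewrite A's fold to a fold over the reversed char list
  have hA : ((PySem.List.pyRange 0 (cs.length : Int) 1).reverse).foldl
      (fun (s : Int × Int × Nat) i =>
        let num : Int := PySem.Chars.find pvAlnum [(PySem.List.pyGet? cs i).getD ' ']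
        let value := if s.2.2 ≠ 0 then s.2.1 + s.1 * num else num
        let index := s.2.2 + 1
        ((62 : Int) ^ index, value, index))
      ((0 : Int), (0 : Int), (0 : Nat))
      = (cs.map (fun c => PySem.Chars.find pvAlnum [c])).reverse.foldl pvStep
          ((0 : Int), (0 : Int), (0 : Nat)) := by
    rw [hrange, ← List.map_reverse, List.foldl_map]
    conv_rhs =>
      rw [← pvMapRangeGetD cs, ← List.map_reverse, ← List.map_reverse, List.map_map,
        List.foldl_map]
    apply PySem.List.foldl_congr_mem
    intro s k hk
    have hklt : k < cs.length := by
      have := List.mem_reverse.mp hk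
      simpa using this
    have hget : PySem.List.pyGet? cs (k : Int) = cs[k]? := PySem.List.pyGet?_natCast cs k
    simp [pvStep, Int.ofNat_eq_natCast, hget, List.getD_eq_getElem?_getD, Function.comp]
  rw [hA, pvStep_run_value]
  rw [show (List.foldl (fun (acc : Int) c => acc * 62 + PySem.Chars.find pvAlnum [c]) 0 cs)
      = List.foldl (fun (acc n : Int) => acc * 62 + n) 0
          (cs.map (fun c => PySem.Chars.find pvAlnum [c])) from by rw [List.foldl_map]]
  rw [pvHorner]
  simp

theorem convert_to_id_eq_alt (value62 : String) :
    convert_to_id value62 = convert_to_id_alt value62 := by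
  simp only [convert_to_id, convert_to_id_alt]
  rw [pvValues_eq value62.toList]
  rw [PySem.Chars.join_cons_cons, PySem.Chars.join_cons_cons, PySem.Chars.join_cons_cons,
    PySem.Chars.join_cons_cons, PySem.Chars.join_singleton]
  simp [List.append_assoc]

-- ===== VERDICT (by name: the statement is the Claim_ definition above) =====
theorem convert_to_id_spec : Claim_equal_convert_to_id := by
  intro v _
  unfold Spec_convert_to_id
  exact convert_to_id_eq_alt v
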